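-- pv_equiv track=rewrite | github.com/alexanderkroh/vmaf-enhanced-encoding | video_quality_pipeline.py | _context_start_frame
-- ===== SOURCE A (Python) =====
-- def _context_start_frame(
--     start_frame: int,
--     context_frames: int,
--     kf_frames: list[int],
-- ) -> int:
--     """
--     Find the keyframe-aligned decode start for encoder preroll.
--
--     Expands start_frame backward by context_frames, then snaps to the nearest
--     keyframe at or before that position.  Always returns a value <= start_frame.
--
--     If no keyframes exist or context is disabled (context_frames == 0),
--     returns start_frame (no preroll).
--     """
--     if context_frames <= 0 or not kf_frames:
--         return start_frame
--     target = max(0, start_frame - context_frames)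
--     # Keyframes that fall at or before start_frame are candidates
--     candidates = [kf for kf in kf_frames if kf <= start_frame]
--     if not candidates:
--         return start_frame
--     # Prefer the largest keyframe that is at or before target
--     at_or_before = [kf for kf in candidates if kf <= target]
--     if at_or_before:
--         return max(0, max(at_or_before))
--     # All source keyframes are between target and start_frame — take the earliest
--     return max(0, min(candidates))
-- ===== SOURCE B (Python) =====
-- def _bisect_right(s, x):
--     # standard bisect_right (rightmost insertion point) on a sorted list
--     lo, hi = 0, len(s)
--     while lo < hi:
--         mid = (lo + hi) // 2
--         if x < s[mid]:
--             hi = mid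
--         else:
--             lo = mid + 1
--     return lo
--
--
-- def _context_start_frame(
--     start_frame: int,
--     context_frames: int,
--     kf_frames: list[int],
-- ) -> int:
--     if context_frames <= 0 or not kf_frames:
--         return start_frame
--     target = max(0, start_frame - context_frames)
--     s = sorted(kf_frames)
--     i = _bisect_right(s, start_frame)     # number of keyframes <= start_frame
--     if i == 0:
--         return start_frame                # no candidate keyframe
--     j = _bisect_right(s, target)          # number of keyframes <= target
--     if j > 0:
--         return max(0, s[j - 1])           # largest keyframe at or before target
--     return max(0, s[0])                   # earliest candidate keyframe
-- ===== Notes on version B (the rewrite author's own statement) =====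
-- stated objective: alternative
-- what changed: Replaced A's two filter comprehensions with max()/min() reductions by sorting the keyframe list once and locating the answers with two binary searches (bisect_right for start_frame and for target), reading the result off the sorted array.
import Mathlib
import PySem

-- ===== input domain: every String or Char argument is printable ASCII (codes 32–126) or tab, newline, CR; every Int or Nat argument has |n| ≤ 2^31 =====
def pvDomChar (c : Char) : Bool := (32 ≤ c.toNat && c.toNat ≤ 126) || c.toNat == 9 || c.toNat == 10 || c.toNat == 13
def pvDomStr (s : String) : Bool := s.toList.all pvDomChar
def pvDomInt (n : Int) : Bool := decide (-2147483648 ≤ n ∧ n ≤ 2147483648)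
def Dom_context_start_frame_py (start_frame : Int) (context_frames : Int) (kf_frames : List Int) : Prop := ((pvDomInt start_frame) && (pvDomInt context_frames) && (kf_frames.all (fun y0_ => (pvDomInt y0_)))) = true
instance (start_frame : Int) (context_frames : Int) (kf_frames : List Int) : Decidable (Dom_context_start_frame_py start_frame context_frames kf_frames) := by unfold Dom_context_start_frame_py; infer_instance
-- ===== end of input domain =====

-- B replaces A's filter comprehensions with max()/min() reductions by sorting the keyframe list once and answering with two binary searches (alternative algorithm, same results).

-- ===== PORT A =====
def context_start_frame_py (start_frame : Int) (context_frames : Int) (kf_frames : List Int) : Int :=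
  if context_frames ≤ 0 ∨ kf_frames = [] then start_frame
  else
    let target := max 0 (start_frame - context_frames)
    let candidates := kf_frames.filter (fun kf => decide (kf ≤ start_frame))
    if candidates = [] then start_frame
    else
      let at_or_before := candidates.filter (fun kf => decide (kf ≤ target))
      if at_or_before ≠ [] then
        -- max(at_or_before): list is nonempty here, so the .getD default is unreachable
        max 0 ((PySem.List.max? at_or_before (fun y => y)).getD 0)
      else
        -- min(candidates): nonempty here, .getD default unreachable
        max 0 ((PySem.List.min? candidates (fun y => y)).getD 0)

-- ===== PORT B =====
-- Source B's hand-written _bisect_right is exactly the standard bisect_right loop = PySem.List.bisectRight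
def context_start_frame_py_alt (start_frame : Int) (context_frames : Int) (kf_frames : List Int) : Int :=
  if context_frames ≤ 0 ∨ kf_frames = [] then start_frame
  else
    let target := max 0 (start_frame - context_frames)
    let s := PySem.List.sorted kf_frames (fun y => y)
    let i := PySem.List.bisectRight s start_frame
    if i = 0 then start_frame
    else
      let j := PySem.List.bisectRight s target
      if 0 < j then
        -- s[j-1]: in range since 0 < j ≤ len(s), so the .getD default is unreachable
        max 0 (s.getD (j - 1) 0)
      else
        -- s[0]: s nonempty here (kf_frames ≠ []), .getD default unreachable
        max 0 (s.getD 0 0)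

-- ===== PRECONDITION & SPEC =====
def Spec_context_start_frame_py (start_frame : Int) (context_frames : Int) (kf_frames : List Int) (out : Int) : Prop := out = context_start_frame_py_alt start_frame context_frames kf_frames
instance (start_frame : Int) (context_frames : Int) (kf_frames : List Int) (out : Int) : Decidable (Spec_context_start_frame_py start_frame context_frames kf_frames out) := by unfold Spec_context_start_frame_py; infer_instance

-- ===== CLAIM (what is proved, stated in full; the proofs are below) =====
def Claim_equal_context_start_frame_py : Prop := ∀ (start_frame : Int) (context_frames : Int) (kf_frames : List Int), Dom_context_start_frame_py start_frame context_frames kf_frames → Spec_context_start_frame_py start_frame context_frames kf_frames (context_start_frame_py start_frame context_frames kf_frames)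

-- ===== LEMMAS AND PROOFS =====

-- the running fold min/max used by PySem.List.min?/max? is a genuine extremum: a member and a bound
theorem pv_foldl_min_mem (l : List Int) (a : Int) : l.foldl min a ∈ a :: l := by
  induction l generalizing a with
  | nil => simp
  | cons x t ih =>
    simp only [List.foldl_cons]
    rcases List.mem_cons.mp (ih (min a x)) with h | h
    · rw [h]
      rcases le_total a x with hax | hax
      · simp [min_eq_left hax]
      · simp [min_eq_right hax]
    · exact List.mem_cons_of_mem _ (List.mem_cons_of_mem _ h)

theorem pv_foldl_min_le (l : List Int) (a : Int) : ∀ y ∈ a :: l, l.foldl min a ≤ y := by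
  induction l generalizing a with
  | nil => simp
  | cons x t ih =>
    intro y hy
    simp only [List.foldl_cons]
    rcases List.mem_cons.mp hy with h | h
    · exact le_trans (ih (min a x) (min a x) (by simp)) (by rw [h]; exact min_le_left a x)
    · rcases List.mem_cons.mp h with h | h
      · exact le_trans (ih (min a x) (min a x) (by simp)) (by rw [h]; exact min_le_right a x)
      · exact ih (min a x) y (by simp [h])

theorem pv_foldl_max_mem (l : List Int) (a : Int) : l.foldl max a ∈ a :: l := by
  induction l generalizing a with
  | nil => simp
  | cons x t ih =>
    simp only [List.foldl_cons]
    rcases List.mem_cons.mp (ih (max a x)) with h | h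
    · rw [h]
      rcases le_total a x with hax | hax
      · simp [max_eq_right hax]
      · simp [max_eq_left hax]
    · exact List.mem_cons_of_mem _ (List.mem_cons_of_mem _ h)

theorem pv_le_foldl_max (l : List Int) (a : Int) : ∀ y ∈ a :: l, y ≤ l.foldl max a := by
  induction l generalizing a with
  | nil => simp
  | cons x t ih =>
    intro y hy
    rcases List.mem_cons.mp hy with h | h
    · exact le_trans (by rw [h]; exact le_max_left a x) (ih (max a x) (max a x) (by simp))
    · rcases List.mem_cons.mp h with h | h
      · exact le_trans (by rw [h]; exact le_max_right a x) (ih (max a x) (max a x) (by simp))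
      · exact ih (max a x) y (by simp [h])

-- ===== VERDICT (by name: the statement is the Claim_ definition above) =====
theorem context_start_frame_py_spec : Claim_equal_context_start_frame_py := by
  intro start c kf _
  unfold Spec_context_start_frame_py context_start_frame_py context_start_frame_py_alt
  by_cases h0 : c ≤ 0 ∨ kf = []
  · simp [h0]
  · simp only [if_neg h0]
    rw [not_or] at h0
    obtain ⟨hc, hkf⟩ := h0
    set t := max 0 (start - c) with ht
    set s := PySem.List.sorted kf (fun y => y) with hsdef
    have hperm : s.Perm kf := PySem.List.sorted_perm kf (fun y => y) false
    have hpw : s.Pairwise (fun a b => a ≤ b) := PySem.List.sorted_pairwise kf (fun y => y)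
    have hsne : s ≠ [] := by
      intro h; exact hkf ((PySem.List.sorted_eq_nil_iff kf (fun y => y) false).mp h)
    have hslen : 0 < s.length := List.length_pos_iff.mpr hsne
    have hmem : ∀ y, y ∈ s ↔ y ∈ kf := fun y => hperm.mem_iff
    obtain ⟨hile, hilt, higt⟩ := PySem.List.bisectRight_spec s start hpw
    obtain ⟨hjle, hjlt, hjgt⟩ := PySem.List.bisectRight_spec s t hpw
    set i := PySem.List.bisectRight s start with hidef
    set j := PySem.List.bisectRight s t with hjdef
    set cand := kf.filter (fun k => decide (k ≤ start)) with hcand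
    by_cases hi0 : i = 0
    · -- no keyframe ≤ start: candidates empty, both return start
      have hce : cand = [] := by
        rw [hcand, List.filter_eq_nil_iff]
        intro y hy
        obtain ⟨k, hk, hky⟩ := List.getElem_of_mem ((hmem y).mpr hy)
        have := higt k hk (by omega)
        simp only [decide_eq_true_eq]
        omega
      simp [hce, hi0]
    · simp only [if_neg hi0]
      have hipos : 0 < i := Nat.pos_of_ne_zero hi0
      have hs0 : s[0] ≤ start := hilt 0 hslen hipos
      have hs0cand : s[0] ∈ cand := by
        rw [hcand, List.mem_filter]
        exact ⟨(hmem _).mp (List.getElem_mem hslen), by simpa using hs0⟩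
      have hcne : cand ≠ [] := fun h => by simp [h] at hs0cand
      rw [if_neg hcne]
      set aob := cand.filter (fun k => decide (k ≤ t)) with haob
      by_cases hj0 : j = 0
      · -- no keyframe ≤ target: at_or_before empty, both fall back to the earliest candidate s[0]
        have hae : aob = [] := by
          rw [haob, List.filter_eq_nil_iff]
          intro y hy
          have hykf : y ∈ kf := by rw [hcand] at hy; exact List.mem_of_mem_filter hy
          obtain ⟨k, hk, hky⟩ := List.getElem_of_mem ((hmem y).mpr hykf)
          have := hjgt k hk (by omega)
          simp only [decide_eq_true_eq]
          omega
        rw [if_neg (by simp [hae]), if_neg (by omega)]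
        obtain ⟨c0, ct, hcc⟩ := List.exists_cons_of_ne_nil hcne
        rw [hcc, PySem.List.min?_id_cons]
        set v := ct.foldl min c0 with hv
        have hvmem : v ∈ cand := by
          have := pv_foldl_min_mem ct c0; rw [hcc]; simpa using this
        have hvle : ∀ y ∈ cand, v ≤ y := by
          intro y hy; rw [hcc] at hy; exact pv_foldl_min_le ct c0 y hy
        have h1 : v ≤ s[0] := hvle _ hs0cand
        have h2 : s[0] ≤ v := by
          obtain ⟨k, hk, hky⟩ := List.getElem_of_mem
            ((hmem v).mpr (List.mem_of_mem_filter (hcand ▸ hvmem)))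
          calc s[0] ≤ s[k] := PySem.List.sorted_id_getElem_mono kf (Nat.zero_le k) (by simpa [hsdef] using hk)
            _ = v := hky
        have hv0 : v = s[0] := le_antisymm h1 h2
        rw [Option.getD_some, hv0, List.getD_eq_getElem s 0 hslen]
      · -- some keyframe ≤ target: A takes max(at_or_before), B reads s[j-1]
        have hjpos : 0 < j := Nat.pos_of_ne_zero hj0
        rw [if_pos hjpos]
        have hjm1 : j - 1 < s.length := by omega
        have hsj : s[j-1] ≤ t := hjlt (j-1) hjm1 (by omega)
        have hs0t : s[0] ≤ t := hjlt 0 hslen hjpos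
        have hs0aob : s[0] ∈ aob := by
          rw [haob, List.mem_filter]
          exact ⟨hs0cand, by simpa using hs0t⟩
        have hane : aob ≠ [] := fun h => by simp [h] at hs0aob
        rw [if_pos (by simpa using hane)]
        obtain ⟨a0, at_, hac⟩ := List.exists_cons_of_ne_nil hane
        rw [hac, PySem.List.max?_id_cons, Option.getD_some]
        set w := at_.foldl max a0 with hw
        have hwmem : w ∈ aob := by
          have := pv_foldl_max_mem at_ a0; rw [hac]; simpa using this
        have hwge : ∀ y ∈ aob, y ≤ w := by
          intro y hy; rw [hac] at hy; exact pv_le_foldl_max at_ a0 y hy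
        have hwprops : w ∈ kf ∧ w ≤ start ∧ w ≤ t := by
          have h1 := List.mem_filter.mp (haob ▸ hwmem)
          have h2 := List.mem_filter.mp (hcand ▸ h1.1)
          refine ⟨h2.1, by simpa using h2.2, by simpa using h1.2⟩
        -- w, a member ≤ target, sits at an index < j, hence w ≤ s[j-1]
        have hwle : w ≤ s[j-1] := by
          obtain ⟨k, hk, hky⟩ := List.getElem_of_mem ((hmem w).mpr hwprops.1)
          have hkj : k < j := by
            by_contra hkn
            have := hjgt k hk (by omega)
            omega
          calc w = s[k] := hky.symm
            _ ≤ s[j-1] := PySem.List.sorted_id_getElem_mono kf (by omega) (by simpa [hsdef] using hjm1)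
        rw [List.getD_eq_getElem s 0 hjm1]
        by_cases hts : t ≤ start
        · -- target ≤ start: s[j-1] is itself a candidate at or before target, so it equals w
          have hsjaob : s[j-1] ∈ aob := by
            rw [haob, List.mem_filter, hcand, List.mem_filter]
            refine ⟨⟨(hmem _).mp (List.getElem_mem hjm1), ?_⟩, by simpa using hsj⟩
            simp only [decide_eq_true_eq]
            omega
          have heq : s[j-1] = w := le_antisymm (hwge _ hsjaob) hwle
          rw [heq]
        · -- start < target forces target = 0 and start < 0: both sides clamp to 0
          have hw0 : max (0:Int) w = 0 := by
            have := hwprops.2.1; omega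
          have hsj0 : max (0:Int) (s[j-1]) = 0 := by
            have : t = 0 := by rw [ht]; omega
            omega
          rw [hw0, hsj0]
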